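-- pv_equiv track=rewrite | github.com/harshad317/TopoPrompt | topoprompt/transfer/store.py | _has_family_signature_prefix_overlap
-- ===== SOURCE A (Python) =====
-- from typing import Any
--
-- def _has_family_signature_prefix_overlap(query_signature: Any, candidate_signature: Any) -> bool:
--     query_prefix = _signature_prefix_tokens(query_signature)
--     candidate_prefix = _signature_prefix_tokens(candidate_signature)
--     if not query_prefix or not candidate_prefix:
--         return False
--     overlap = 0
--     for query_token, candidate_token in zip(query_prefix, candidate_prefix, strict=False):
--         if query_token != candidate_token:
--             break
--         overlap += 1
--     return overlap >= min(2, len(query_prefix), len(candidate_prefix))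
--
-- def _signature_prefix_tokens(signature: Any) -> list[str]:
--     prefix = str(signature or "").split("|", maxsplit=1)[0].strip()
--     if not prefix:
--         return []
--     return [token for token in prefix.split("-") if token]
-- ===== SOURCE B (Python) =====
-- def _first_two_tokens(signature):
--     prefix = str(signature or "").split("|", maxsplit=1)[0].strip()
--     it = (token for token in prefix.split("-") if token)
--     return next(it, None), next(it, None)
--
-- def _has_family_signature_prefix_overlap(query_signature, candidate_signature) -> bool:
--     q1, q2 = _first_two_tokens(query_signature)
--     c1, c2 = _first_two_tokens(candidate_signature)
--     if q1 is None or c1 is None: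
--         return False
--     return q1 == c1 and (q2 is None or c2 is None or q2 == c2)
-- ===== Notes on version B (the rewrite author's own statement) =====
-- stated objective: alternative
-- what changed: B never builds or compares token lists: a generator-based helper extracts only the first two tokens of each signature as optional values, and the result is a closed boolean formula over those four options (first tokens equal, and second tokens equal unless either side has none), replacing A's tokenise-everything + overlap-counting loop with early break and threshold test.
import Mathlib
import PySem

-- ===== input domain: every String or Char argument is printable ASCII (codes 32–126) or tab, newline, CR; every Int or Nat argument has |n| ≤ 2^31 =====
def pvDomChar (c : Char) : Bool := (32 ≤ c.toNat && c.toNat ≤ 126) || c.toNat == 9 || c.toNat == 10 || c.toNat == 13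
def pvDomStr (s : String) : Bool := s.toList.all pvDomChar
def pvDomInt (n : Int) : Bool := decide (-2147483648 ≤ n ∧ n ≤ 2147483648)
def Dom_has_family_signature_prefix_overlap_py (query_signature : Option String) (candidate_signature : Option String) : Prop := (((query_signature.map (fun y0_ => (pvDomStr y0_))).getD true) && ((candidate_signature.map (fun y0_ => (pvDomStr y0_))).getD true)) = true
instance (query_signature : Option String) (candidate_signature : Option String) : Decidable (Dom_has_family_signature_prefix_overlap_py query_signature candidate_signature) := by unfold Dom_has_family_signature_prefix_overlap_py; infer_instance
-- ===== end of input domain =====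

-- B extracts only the first two tokens of each signature as Option values and decides by a
-- closed boolean formula over them, instead of A's full tokenisation + overlap-counting loop;
-- objective: alternative (no measured speedup claimed).


-- ===== PORT A =====
-- A's helper _signature_prefix_tokens; `str(signature or "")` on Option String: none → "", some s → s
def sigPrefixTokens (signature : Option String) : List String :=
  let s := signature.getD ""
  let pfx := PySem.Str.strip ((((PySem.Str.splitMax? s "|" 1).getD []).headD ""))
  if pfx = "" then []
  else ((PySem.Str.split? pfx "-").getD []).filter (fun t => t ≠ "")

-- A's `for … zip … break` loop: overlap accumulator, stop at first mismatch
def overlapLoop : List (String × String) → Nat → Nat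
  | [], ov => ov
  | (q, c) :: rest, ov => if q ≠ c then ov else overlapLoop rest (ov + 1)

def has_family_signature_prefix_overlap_py (query_signature : Option String) (candidate_signature : Option String) : Bool :=
  let query_prefix := sigPrefixTokens query_signature
  let candidate_prefix := sigPrefixTokens candidate_signature
  if query_prefix.isEmpty || candidate_prefix.isEmpty then false
  else
    let overlap := overlapLoop (query_prefix.zip candidate_prefix) 0
    decide (min 2 (min query_prefix.length candidate_prefix.length) ≤ overlap)

-- ===== PORT B =====
-- B's helper _first_two_tokens: the generator yields the nonempty pieces of prefix.split("-"),
-- and the two next(it, None) calls take its first two elements (head? and [1]? of that sequence)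
def firstTwoTokens (signature : Option String) : Option String × Option String :=
  let s := signature.getD ""
  let pfx := PySem.Str.strip ((((PySem.Str.splitMax? s "|" 1).getD []).headD ""))
  let toks := ((PySem.Str.split? pfx "-").getD []).filter (fun t => t ≠ "")
  (toks.head?, toks[1]?)

def has_family_signature_prefix_overlap_py_alt (query_signature : Option String) (candidate_signature : Option String) : Bool :=
  let qt := firstTwoTokens query_signature
  let ct := firstTwoTokens candidate_signature
  if qt.1.isNone || ct.1.isNone then false
  else (qt.1 == ct.1) && (qt.2.isNone || ct.2.isNone || qt.2 == ct.2)

-- ===== PRECONDITION & SPEC =====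
def Spec_has_family_signature_prefix_overlap_py (query_signature : Option String) (candidate_signature : Option String) (out : Bool) : Prop := out = has_family_signature_prefix_overlap_py_alt query_signature candidate_signature
instance (query_signature : Option String) (candidate_signature : Option String) (out : Bool) : Decidable (Spec_has_family_signature_prefix_overlap_py query_signature candidate_signature out) := by unfold Spec_has_family_signature_prefix_overlap_py; infer_instance

-- ===== CLAIM (what is proved, stated in full; the proofs are below) =====
def Claim_equal_has_family_signature_prefix_overlap_py : Prop := ∀ (query_signature : Option String) (candidate_signature : Option String), Dom_has_family_signature_prefix_overlap_py query_signature candidate_signature → Spec_has_family_signature_prefix_overlap_py query_signature candidate_signature (has_family_signature_prefix_overlap_py query_signature candidate_signature)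

-- ===== LEMMAS AND PROOFS =====
-- B's token sequence coincides with A's token list (A's empty-prefix guard is redundant:
-- "".split("-") is [""] and the filter removes it)
theorem firstTwoTokens_eq (s : Option String) :
    firstTwoTokens s = ((sigPrefixTokens s).head?, (sigPrefixTokens s)[1]?) := by
  unfold firstTwoTokens sigPrefixTokens
  by_cases h : PySem.Str.strip ((((PySem.Str.splitMax? (s.getD "") "|" 1).getD []).headD "")) = ""
  · simp only [h]
    decide
  · simp only [if_neg h]

theorem firstTwoTokens_fst (s : Option String) :
    (firstTwoTokens s).1 = (sigPrefixTokens s).head? := by rw [firstTwoTokens_eq]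

theorem firstTwoTokens_snd (s : Option String) :
    (firstTwoTokens s).2 = (sigPrefixTokens s)[1]? := by rw [firstTwoTokens_eq]

theorem le_overlapLoop (l : List (String × String)) (n : Nat) : n ≤ overlapLoop l n := by
  induction l generalizing n with
  | nil => exact le_refl n
  | cons p rest ih =>
    obtain ⟨q, c⟩ := p
    simp only [overlapLoop]
    split
    · exact le_refl n
    · exact le_trans (Nat.le_succ n) (ih (n + 1))

-- A's thresholded overlap count over the full token lists equals B's formula over
-- the first two tokens of each list
theorem key (qp cp : List String) :
    (if qp.isEmpty || cp.isEmpty then false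
     else decide (min 2 (min qp.length cp.length) ≤ overlapLoop (qp.zip cp) 0))
    = (if (qp.head?).isNone || (cp.head?).isNone then false
       else (qp.head? == cp.head?) && (qp[1]?.isNone || cp[1]?.isNone || qp[1]? == cp[1]?)) := by
  match qp, cp with
  | [], _ => simp
  | _ :: _, [] => simp
  | q1 :: qt, c1 :: ct =>
    simp only [List.isEmpty_cons, Bool.or_self, Bool.false_eq_true, if_false,
      List.zip_cons_cons, List.head?_cons, overlapLoop]
    by_cases h1 : q1 = c1
    · subst h1
      simp only [ne_eq, not_true_eq_false, if_false]
      match qt, ct with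
      | [], ct =>
        have : min 2 (min ([] : List String).length.succ ct.length.succ) ≤ overlapLoop ([].zip ct) (0 + 1) := by
          have := le_overlapLoop (([] : List String).zip ct) (0 + 1)
          simp only [List.length_nil] at *
          omega
        simp [overlapLoop]
      | q2 :: qt, [] =>
        have : min 2 (min (q2 :: qt).length.succ ([] : List String).length.succ)
            ≤ overlapLoop ((q2 :: qt).zip []) (0 + 1) := by
          simp [overlapLoop, List.zip_nil_right]
        simp [overlapLoop]
      | q2 :: qt, c2 :: ct =>
        simp only [List.zip_cons_cons, overlapLoop, List.length_cons]
        have hmin : min 2 (min (qt.length + 1 + 1) (ct.length + 1 + 1)) = 2 := by omega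
        by_cases h2 : q2 = c2
        · subst h2
          simp only [ne_eq, not_true_eq_false, if_false]
          have hle : 2 ≤ overlapLoop (qt.zip ct) (0 + 1 + 1) := le_overlapLoop _ _
          simp [hle]
        · simp [h2]
    · have hn : ¬ (min 2 (min (q1 :: qt).length (c1 :: ct).length) ≤ 0) := by
        simp only [List.length_cons]
        omega
      simp [h1]

-- ===== VERDICT (by name: the statement is the Claim_ definition above) =====
set_option maxHeartbeats 1000000 in
theorem has_family_signature_prefix_overlap_py_spec : Claim_equal_has_family_signature_prefix_overlap_py := by
  intro q c _
  unfold Spec_has_family_signature_prefix_overlap_py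
  unfold has_family_signature_prefix_overlap_py has_family_signature_prefix_overlap_py_alt
  simp only [firstTwoTokens_fst, firstTwoTokens_snd]
  exact key (sigPrefixTokens q) (sigPrefixTokens c)
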